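-- pv_equiv track=rewrite | github.com/sqlmapproject/sqlmap | tamper/charencode.py | tamper
-- ===== SOURCE A (Python) =====
-- import string
--
-- def tamper(payload, headers):
--     """
--     Url-encodes all characters in a given payload (not processing already
--     encoded)
--
--     Example:
--         * Input: SELECT FIELD FROM%20TABLE
--         * Output: %53%45%4c%45%43%54%20%46%49%45%4c%44%20%46%52%4f%4d%20%54%41%42%4c%45
--
--     Tested against:
--         * Microsoft SQL Server 2005
--         * MySQL 4, 5.0 and 5.5
--         * Oracle 10g
--         * PostgreSQL 8.3, 8.4, 9.0
--
--     Notes: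
--         * Useful to bypass very weak web application firewalls that do not
--           url-decode the request before processing it through their ruleset
--         * The web server will anyway pass the url-decoded version behind,
--           hence it should work against any DBMS
--     """
--
--     retVal = payload
--
--     if payload:
--         retVal = ""
--         i = 0
--
--         while i < len(payload):
--             if payload[i] == '%' and (i < len(payload) - 2) and payload[i+1:i+2] in string.hexdigits and payload[i+2:i+3] in string.hexdigits:
--                 retVal += payload[i:i+3]
--                 i += 3
--             else:
--                 retVal += '%%%.2X' % ord(payload[i])
--                 i += 1
--
--     return retVal, headers
-- ===== SOURCE B (Python) =====
-- import re
--
-- def tamper(payload, headers):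
--     """
--     Url-encodes all characters in a given payload (not processing already
--     encoded): regex tokenization instead of a manual index state machine.
--     """
--     retVal = payload
--
--     if payload:
--         retVal = re.sub(
--             r"%[0-9a-fA-F]{2}|.",
--             lambda m: m.group(0) if len(m.group(0)) == 3 else "%%%.2X" % ord(m.group(0)),
--             payload,
--             flags=re.DOTALL,
--         )
--
--     return retVal, headers
-- ===== Notes on version B (the rewrite author's own statement) =====
-- stated objective: faster
-- what changed: Replaced the manual index/while state machine (with string-slice tests and quadratic retVal += concatenation) by a single regex substitution over r"%[0-9a-fA-F]{2}|." with DOTALL that tokenizes the payload into already-encoded triples and single characters and encodes only the latter, building the output in one pass.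
import Mathlib
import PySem

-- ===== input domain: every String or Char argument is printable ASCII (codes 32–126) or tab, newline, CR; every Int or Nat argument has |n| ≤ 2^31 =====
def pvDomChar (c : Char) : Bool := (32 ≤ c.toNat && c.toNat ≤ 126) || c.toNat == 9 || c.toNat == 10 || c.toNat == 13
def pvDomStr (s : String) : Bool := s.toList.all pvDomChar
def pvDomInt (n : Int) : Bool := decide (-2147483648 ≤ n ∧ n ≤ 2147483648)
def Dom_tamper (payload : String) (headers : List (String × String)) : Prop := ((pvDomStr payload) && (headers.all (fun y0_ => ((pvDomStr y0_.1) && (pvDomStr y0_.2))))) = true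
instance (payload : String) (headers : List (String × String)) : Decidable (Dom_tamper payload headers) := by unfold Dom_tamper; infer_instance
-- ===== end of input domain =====

-- B replaces A's index/while state machine by a regex-style tokenizer (already-encoded %XX triples | single chars); return value only, neither version mutates its arguments.

-- '%%%.2X' % ord(c) : '%' followed by ord(c) in uppercase hex, zero-padded to width 2 (shared formatting helper)
def pctEnc (c : Char) : List Char :=
  let ds := (Nat.toDigits 16 c.toNat).map Char.toUpper
  '%' :: (if ds.length < 2 then '0' :: ds else ds)

-- ===== PORT A =====
-- string.hexdigits
def hexdigitsA : List Char := "0123456789abcdefABCDEF".toList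

-- the while loop of A: index i, accumulated retVal
def tamperLoop (p : List Char) (i : Nat) (acc : List Char) : List Char :=
  if _h : i < p.length then
    if (PySem.List.pyGet? p (i : Int) == some '%')
        && decide ((i : Int) < (p.length : Int) - 2)
        && PySem.Chars.isIn (PySem.List.slice p (some ((i : Int) + 1)) (some ((i : Int) + 2))) hexdigitsA
        && PySem.Chars.isIn (PySem.List.slice p (some ((i : Int) + 2)) (some ((i : Int) + 3))) hexdigitsA then
      tamperLoop p (i + 3) (acc ++ PySem.List.slice p (some (i : Int)) (some ((i : Int) + 3)))
    else
      tamperLoop p (i + 1) (acc ++ pctEnc (PySem.List.pyGetD p (i : Int) ' '))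
  else acc
termination_by p.length - i

def tamper (payload : String) (headers : List (String × String)) : String × (List (String × String)) :=
  if payload = "" then (payload, headers)
  else (String.ofList (tamperLoop payload.toList 0 []), headers)

-- ===== PORT B =====
-- the regex character class [0-9a-fA-F]
def hexClassB : List Char := "0123456789abcdefABCDEF".toList

-- the scan of re.sub over r"%[0-9a-fA-F]{2}|." with DOTALL: greedy left-to-right tokenization,
-- at each position first try the 3-char %XX alternative, else match one (any) character
def tokensB : List Char → List (List Char)
  | [] => []
  | c :: rest =>
      if c = '%' then
        match rest with
        | a :: b :: rest' =>
            if hexClassB.contains a && hexClassB.contains b then [c, a, b] :: tokensB rest'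
            else [c] :: tokensB (a :: b :: rest')
        | [a] => [c] :: tokensB [a]
        | [] => [c] :: tokensB []
      else [c] :: tokensB rest
termination_by l => l.length
decreasing_by all_goals (simp; try omega)

-- the substitution lambda: a 3-char token is kept, a single char is url-encoded
def replB (t : List Char) : List Char :=
  if t.length == 3 then t else pctEnc (t.headD ' ')

def tamper_alt (payload : String) (headers : List (String × String)) : String × (List (String × String)) :=
  if payload = "" then (payload, headers)
  else (String.ofList ((tokensB payload.toList).flatMap replB), headers)

-- ===== PRECONDITION & SPEC =====
def Spec_tamper (payload : String) (headers : List (String × String)) (out : String × (List (String × String))) : Prop := out = tamper_alt payload headers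
instance (payload : String) (headers : List (String × String)) (out : String × (List (String × String))) : Decidable (Spec_tamper payload headers out) := by unfold Spec_tamper; infer_instance

-- ===== CLAIM (what is proved, stated in full; the proofs are below) =====
def Claim_equal_tamper : Prop := ∀ (payload : String) (headers : List (String × String)), Dom_tamper payload headers → Spec_tamper payload headers (tamper payload headers)

-- ===== LEMMAS AND PROOFS =====

theorem isIn_singleton_eq_contains (c : Char) (l : List Char) :
    PySem.Chars.isIn [c] l = l.contains c := by
  rcases h : PySem.Chars.isIn [c] l with _|_
  · rw [PySem.Chars.isIn_eq_false_iff, List.singleton_infix_iff] at h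
    simp [h]
  · rw [PySem.Chars.isIn_iff_infix, List.singleton_infix_iff] at h
    simp [h]

theorem slice_one (p : List Char) (j : Nat) (h : j < p.length) :
    PySem.List.slice p (some ((j : Nat) : Int)) (some (((j : Nat) : Int) + 1)) = [p[j]] := by
  have h1 : (((j : Nat) : Int) + 1) = ((j + 1 : Nat) : Int) := by push_cast; ring
  rw [h1, PySem.List.slice_natCast]
  have h2 : j + 1 - j = 1 := by omega
  rw [h2, List.drop_eq_getElem_cons h, List.take_succ_cons, List.take_zero]

-- one-step unfoldings of B's tokenizer
theorem tk_other (c : Char) (rest : List Char) (hc : ¬ c = '%') :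
    tokensB (c :: rest) = [c] :: tokensB rest := by
  rw [tokensB.eq_def]; simp [hc]

theorem tk_pct3 (a b : Char) (rest' : List Char) : tokensB ('%' :: a :: b :: rest') =
    if hexClassB.contains a && hexClassB.contains b then ['%', a, b] :: tokensB rest'
    else ['%'] :: tokensB (a :: b :: rest') := by
  rw [tokensB.eq_def]; simp

theorem tk_pct1 : tokensB ['%'] = [['%']] := by
  rw [tokensB.eq_def]; simp [tokensB]

theorem tk_pct2 (a : Char) : tokensB ['%', a] = ['%'] :: tokensB [a] := by
  rw [tokensB.eq_def]; simp

theorem loop_eq_aux (N : Nat) : ∀ (p : List Char) (i : Nat) (acc : List Char),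
    p.length - i ≤ N →
    tamperLoop p i acc = acc ++ (tokensB (p.drop i)).flatMap replB := by
  induction N with
  | zero =>
    intro p i acc hN
    rw [tamperLoop, dif_neg (by omega), List.drop_eq_nil_of_le (by omega), tokensB]
    simp
  | succ N ih =>
    intro p i acc hN
    rw [tamperLoop]
    by_cases hi : i < p.length
    · rw [dif_pos hi]
      have hdrop : p.drop i = p[i] :: p.drop (i + 1) := List.drop_eq_getElem_cons hi
      have hget : (PySem.List.pyGet? p (i : Int) == some '%') = (p[i] == '%') := by
        simp [PySem.List.pyGet?_natCast, List.getElem?_eq_getElem hi]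
      have hgd : PySem.List.pyGetD p (i : Int) ' ' = p[i] := by
        rw [PySem.List.pyGetD_natCast]
        simp [List.getD_eq_getElem?_getD, List.getElem?_eq_getElem hi]
      by_cases hc : p[i] = '%'
      · -- current char is '%'
        by_cases hb : i + 2 < p.length
        · -- a full %XX triple fits (A's `i < len - 2` guard holds)
          have hb' : decide ((i : Int) < (p.length : Int) - 2) = true := by
            simp only [decide_eq_true_eq]; omega
          have hi1 : i + 1 < p.length := by omega
          have hAB : hexdigitsA = hexClassB := rfl
          have hcont1 : PySem.Chars.isIn (PySem.List.slice p (some ((i : Int) + 1)) (some ((i : Int) + 2))) hexdigitsA = hexClassB.contains p[i+1] := by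
            have e1 : ((i : Int) + 1) = (((i + 1 : Nat) : Nat) : Int) := by push_cast; ring
            have e2 : ((i : Int) + 2) = ((((i + 1 : Nat) : Nat) : Int) + 1) := by push_cast; ring
            rw [e1, e2, slice_one p (i+1) hi1, isIn_singleton_eq_contains, hAB]
          have hcont2 : PySem.Chars.isIn (PySem.List.slice p (some ((i : Int) + 2)) (some ((i : Int) + 3))) hexdigitsA = hexClassB.contains p[i+2] := by
            have e1 : ((i : Int) + 2) = (((i + 2 : Nat) : Nat) : Int) := by push_cast; ring
            have e2 : ((i : Int) + 3) = ((((i + 2 : Nat) : Nat) : Int) + 1) := by push_cast; ring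
            rw [e1, e2, slice_one p (i+2) hb, isIn_singleton_eq_contains, hAB]
          have hdrop1 : p.drop (i + 1) = p[i+1] :: p.drop (i + 2) := List.drop_eq_getElem_cons hi1
          have hdrop2 : p.drop (i + 2) = p[i+2] :: p.drop (i + 3) := List.drop_eq_getElem_cons hb
          by_cases hhex : (hexClassB.contains p[i+1] && hexClassB.contains p[i+2]) = true
          · -- already-encoded triple: A copies the 3-char slice, B keeps the 3-char token
            have hg : ((PySem.List.pyGet? p (i : Int) == some '%')
                && decide ((i : Int) < (p.length : Int) - 2)
                && PySem.Chars.isIn (PySem.List.slice p (some ((i : Int) + 1)) (some ((i : Int) + 2))) hexdigitsA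
                && PySem.Chars.isIn (PySem.List.slice p (some ((i : Int) + 2)) (some ((i : Int) + 3))) hexdigitsA) = true := by
              rw [hget, hb', hcont1, hcont2]
              simp only [hc, beq_self_eq_true, Bool.true_and]
              exact hhex
            have hslice3 : PySem.List.slice p (some (i : Int)) (some ((i : Int) + 3)) = [p[i], p[i+1], p[i+2]] := by
              have e2 : ((i : Int) + 3) = ((i + 3 : Nat) : Int) := by push_cast; ring
              rw [e2, PySem.List.slice_natCast]
              have h3 : i + 3 - i = 3 := by omega
              rw [h3, hdrop, hdrop1, hdrop2]
              rfl
            rw [if_pos hg, hslice3, ih p (i + 3) _ (by omega), hdrop, hc, hdrop1, hdrop2,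
              tk_pct3, if_pos hhex]
            simp [List.flatMap_cons, replB]
          · -- '%' not followed by two hex digits: both encode the single '%'
            have hg : ((PySem.List.pyGet? p (i : Int) == some '%')
                && decide ((i : Int) < (p.length : Int) - 2)
                && PySem.Chars.isIn (PySem.List.slice p (some ((i : Int) + 1)) (some ((i : Int) + 2))) hexdigitsA
                && PySem.Chars.isIn (PySem.List.slice p (some ((i : Int) + 2)) (some ((i : Int) + 3))) hexdigitsA) = false := by
              rw [hget, hb', hcont1, hcont2]
              simp only [hc, beq_self_eq_true, Bool.true_and]
              exact Bool.eq_false_iff.mpr hhex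
            rw [if_neg (by simp only [hg]; exact Bool.false_ne_true), hgd,
              ih p (i + 1) _ (by omega), hdrop, hc, hdrop1, hdrop2, tk_pct3, if_neg hhex]
            simp [List.flatMap_cons, replB]
        · -- '%' too close to the end: A's `i < len - 2` guard fails; the %XX alternative cannot match either
          have hb' : decide ((i : Int) < (p.length : Int) - 2) = false := by
            simp only [decide_eq_false_iff_not]; omega
          have hg : ((PySem.List.pyGet? p (i : Int) == some '%')
              && decide ((i : Int) < (p.length : Int) - 2)
              && PySem.Chars.isIn (PySem.List.slice p (some ((i : Int) + 1)) (some ((i : Int) + 2))) hexdigitsA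
              && PySem.Chars.isIn (PySem.List.slice p (some ((i : Int) + 2)) (some ((i : Int) + 3))) hexdigitsA) = false := by
            rw [hb']; simp
          rw [if_neg (by simp only [hg]; exact Bool.false_ne_true), hgd,
            ih p (i + 1) _ (by omega), hdrop, hc]
          rcases hm : p.drop (i + 1) with _ | ⟨a, _ | ⟨b, t⟩⟩
          · rw [tk_pct1]
            simp [List.flatMap_cons, replB, tokensB]
          · rw [tk_pct2]
            simp [List.flatMap_cons, replB]
          · exfalso
            have := congrArg List.length hm
            simp at this
            omega
      · -- ordinary character: both encode it
        have hg : ((PySem.List.pyGet? p (i : Int) == some '%')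
            && decide ((i : Int) < (p.length : Int) - 2)
            && PySem.Chars.isIn (PySem.List.slice p (some ((i : Int) + 1)) (some ((i : Int) + 2))) hexdigitsA
            && PySem.Chars.isIn (PySem.List.slice p (some ((i : Int) + 2)) (some ((i : Int) + 3))) hexdigitsA) = false := by
          rw [hget]; simp [hc]
        rw [if_neg (by simp only [hg]; exact Bool.false_ne_true), hgd,
          ih p (i + 1) _ (by omega), hdrop, tk_other _ _ hc]
        simp [List.flatMap_cons, replB]
    · rw [dif_neg hi, List.drop_eq_nil_of_le (by omega), tokensB]
      simp

theorem loop_eq (p : List Char) (acc : List Char) :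
    tamperLoop p 0 acc = acc ++ (tokensB p).flatMap replB := by
  simpa using loop_eq_aux p.length p 0 acc (by omega)

-- ===== VERDICT (by name: the statement is the Claim_ definition above) =====
theorem tamper_spec : Claim_equal_tamper := by
  intro payload headers _
  unfold Spec_tamper tamper tamper_alt
  split
  · rfl
  · rw [loop_eq]
    simp
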